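-- pv_equiv track=rewrite | github.com/ihgazni/LinkedIn_toolset | UNO-REG-GUEST-HOME/nhome.py | is_parent
-- ===== SOURCE A (Python) =====
-- def is_parent(son,parent):
--     son = son.rstrip('/')
--     parent = parent.rstrip('/')
--     sks = son.split('/')
--     pks = parent.split('/')
--     if(pks.__len__() >= sks.__len__()):
--         return(0)
--     if((sks.__len__() - pks.__len__()) == 1):
--         for i in range(0,pks.__len__()):
--             if(sks[i] == pks[i]):
--                 pass
--             else:
--                 return(0)
--         return(1)
--     else:
--         return(0)
-- ===== SOURCE B (Python) =====
-- def is_parent(son, parent):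
--     son = son.rstrip('/')
--     parent = parent.rstrip('/')
--     return 1 if son.startswith(parent + '/') and '/' not in son[len(parent)+1:] else 0
-- ===== Notes on version B (the rewrite author's own statement) =====
-- stated objective: simpler
-- what changed: B replaces A's split-both-paths-and-loop-over-components comparison by a direct string test: son starts with parent + '/' and the remaining suffix contains no further '/'.
import Mathlib
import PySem

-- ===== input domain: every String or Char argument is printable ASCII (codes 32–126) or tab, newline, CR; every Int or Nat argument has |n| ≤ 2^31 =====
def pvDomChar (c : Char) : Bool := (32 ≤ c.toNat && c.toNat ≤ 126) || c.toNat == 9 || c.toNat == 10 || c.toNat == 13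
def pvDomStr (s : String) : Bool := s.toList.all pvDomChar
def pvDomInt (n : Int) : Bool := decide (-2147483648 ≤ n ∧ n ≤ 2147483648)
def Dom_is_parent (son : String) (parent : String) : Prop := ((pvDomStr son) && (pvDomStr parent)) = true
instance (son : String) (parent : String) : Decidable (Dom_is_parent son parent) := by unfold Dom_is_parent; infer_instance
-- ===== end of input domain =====

-- ===== PORT A =====
-- B changes: direct "son starts with parent + '/' and the suffix has no '/'" test instead of splitting both paths and looping over components (objective: simpler).
-- rstrip('/'): drop trailing '/' characters (exact hand port of str.rstrip with the single char '/')
def rstripSlash (s : String) : String := String.ofList ((s.toList.reverse.dropWhile (· == '/')).reverse)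

-- the for-loop of A over the index list: returns 0 at the first mismatch, 1 if all compare equal
def isParentLoop (sks pks : List String) : List Int → Int
  | [] => 1
  | i :: rest =>
    if PySem.List.pyGet? sks i = PySem.List.pyGet? pks i then isParentLoop sks pks rest else 0

def is_parent (son : String) (parent : String) : Int :=
  let son := rstripSlash son
  let parent := rstripSlash parent
  let sks := (PySem.Str.split? son "/").getD []     -- sep "/" ≠ "", so split? is some
  let pks := (PySem.Str.split? parent "/").getD []
  if pks.length ≥ sks.length then 0
  else if (sks.length : Int) - (pks.length : Int) = 1 then
    isParentLoop sks pks (PySem.List.pyRange 0 (pks.length : Int) 1)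
  else 0

-- ===== PORT B =====
def is_parent_alt (son : String) (parent : String) : Int :=
  let son := rstripSlash son
  let parent := rstripSlash parent
  if PySem.Str.startswith son (parent ++ "/")
      && !(PySem.Str.isIn "/" (PySem.Str.slice son (some ((PySem.Str.len parent) + 1)) none)) then 1
  else 0

-- ===== PRECONDITION & SPEC =====
def Spec_is_parent (son : String) (parent : String) (out : Int) : Prop := out = is_parent_alt son parent
instance (son : String) (parent : String) (out : Int) : Decidable (Spec_is_parent son parent out) := by unfold Spec_is_parent; infer_instance

-- ===== CLAIM (what is proved, stated in full; the proofs are below) =====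
def Claim_equal_is_parent : Prop := ∀ (son : String) (parent : String), Dom_is_parent son parent → Spec_is_parent son parent (is_parent son parent)

-- ===== LEMMAS AND PROOFS =====

-- 1. PySem splitOn with a single-char separator is Lean's List.splitOn
theorem pysplit_go_single (c : Char) : ∀ (fuel : Nat) (l cur : List Char) (acc : List (List Char)), l.length < fuel →
    PySem.Chars.splitOn.go [c] fuel l cur acc
      = acc.reverse ++ (l.splitOn c).modifyHead (cur.reverse ++ ·) := by
  intro fuel
  induction fuel with
  | zero => intro l cur acc h; omega
  | succ fuel ih =>
    intro l cur acc h
    cases l with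
    | nil => simp [PySem.Chars.splitOn.go, List.splitOn]
    | cons ch rest =>
      by_cases hc : ch = c
      · subst hc
        have h1 : [ch].isPrefixOf (ch :: rest) = true := by simp [List.isPrefixOf]
        rw [PySem.Chars.splitOn.go.eq_def]
        simp only [if_pos h1]
        simp only [List.length_nil, List.length_cons, List.drop_succ_cons, List.drop_zero]
        rw [ih rest [] (cur.reverse :: acc) (by simpa using h)]
        rcases hsp : rest.splitOn ch with - | ⟨hd, tl⟩
        · exact absurd hsp (List.splitOnP_ne_nil _ _)
        · simp [List.splitOn, List.splitOnP_cons] at hsp ⊢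
          simp [hsp]
      · have h1 : [c].isPrefixOf (ch :: rest) = false := by
          simp [List.isPrefixOf]; exact fun hh => absurd hh.symm hc
        rw [PySem.Chars.splitOn.go.eq_def]
        simp only [h1, Bool.false_eq_true, if_false]
        rw [ih rest (ch :: cur) acc (by simpa using h)]
        rcases hsp : rest.splitOn c with - | ⟨hd, tl⟩
        · exact absurd hsp (List.splitOnP_ne_nil _ _)
        · simp only [List.splitOn, List.splitOnP_cons] at *
          rw [if_neg (by simp [hc])]
          simp [hsp]


theorem pysplit_single (c : Char) (cs : List Char) :
    PySem.Chars.splitOn cs [c] = cs.splitOn c := by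
  rw [PySem.Chars.splitOn, pysplit_go_single c (cs.length + 1) cs [] [] (by omega)]
  rcases hsp : cs.splitOn c with - | ⟨hd, tl⟩
  · exact absurd hsp (List.splitOnP_ne_nil _ _)
  · simp

-- 2. components of splitOnP contain no separator
theorem mem_splitOnP_not (p : Char → Bool) : ∀ (xs t : List Char), t ∈ xs.splitOnP p → ∀ x ∈ t, ¬ p x := by
  intro xs
  induction xs with
  | nil => intro t ht; simp [List.splitOnP_nil] at ht; simp [ht]
  | cons a xs ih =>
    intro t ht
    rw [List.splitOnP_cons] at ht
    by_cases hpa : p a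
    · simp [hpa] at ht
      rcases ht with ht | ht
      · simp [ht]
      · exact ih t ht
    · rcases hsp : xs.splitOnP p with - | ⟨hd, tl⟩
      · exact absurd hsp (List.splitOnP_ne_nil _ _)
      · simp [hpa, hsp] at ht
        rcases ht with ht | ht
        · subst ht
          intro x hx
          rcases List.mem_cons.mp hx with hx | hx
          · simpa [hx] using hpa
          · exact ih hd (by simp [hsp]) x hx
        · exact ih t (by simp [hsp, ht])

-- 3. intercalate over an appended last component
theorem intercalate_append_singleton (c : Char) : ∀ (P : List (List Char)) (t : List Char), P ≠ [] →
    [c].intercalate (P ++ [t]) = [c].intercalate P ++ c :: t := by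
  intro P
  induction P with
  | nil => intro t h; exact absurd rfl h
  | cons x xs ih =>
    intro t _
    cases xs with
    | nil => simp [List.intercalate]
    | cons y ys =>
      have := ih t (by simp)
      simp only [List.intercalate] at this ⊢
      simp only [List.cons_append, List.intersperse_cons₂, List.flatten_cons] at this ⊢
      simp [this]

-- 4. prefix transfers through an injective map
theorem map_prefix_iff {f : List Char → String} (hf : Function.Injective f) :
    ∀ (P L : List (List Char)), P.map f <+: L.map f ↔ P <+: L := by
  intro P
  induction P with
  | nil => simp
  | cons x xs ih =>
    intro L
    cases L with
    | nil => simp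
    | cons y ys =>
      simp only [List.map_cons, List.cons_prefix_cons]
      constructor
      · rintro ⟨h1, h2⟩; exact ⟨hf h1, (ih ys).mp h2⟩
      · rintro ⟨h1, h2⟩; exact ⟨congrArg f h1, (ih ys).mpr h2⟩

-- 5. A's loop is the all-components-equal test
theorem loop_eq_if (sks pks : List String) : ∀ (l : List Int),
    isParentLoop sks pks l =
      if ∀ i ∈ l, PySem.List.pyGet? sks i = PySem.List.pyGet? pks i then 1 else 0 := by
  intro l
  induction l with
  | nil => simp [isParentLoop]
  | cons i rest ih =>
    rw [isParentLoop]
    by_cases hi : PySem.List.pyGet? sks i = PySem.List.pyGet? pks i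
    · rw [if_pos hi, ih]
      by_cases hall : ∀ j ∈ rest, PySem.List.pyGet? sks j = PySem.List.pyGet? pks j
      · rw [if_pos hall, if_pos (by simpa [hi] using hall)]
      · rw [if_neg hall, if_neg (fun h => hall (fun j hj => h j (List.mem_cons_of_mem _ hj)))]
    · rw [if_neg hi, if_neg (by intro h; exact hi (h i (by simp)))]

-- 6. the index loop over range(0, len pks) is the prefix test
theorem forall_range_get_iff_prefix {α : Type} [DecidableEq α] (xs ys : List α)
    (_h : xs.length = ys.length + 1) :
    (∀ i ∈ PySem.List.pyRange 0 (ys.length : Int) 1,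
        PySem.List.pyGet? xs i = PySem.List.pyGet? ys i) ↔ ys <+: xs := by
  constructor
  · intro h'
    rw [List.prefix_iff_eq_take]
    apply List.ext_getElem?
    intro k
    by_cases hk : k < ys.length
    · have := h' (k : Int) (by simp [PySem.List.mem_pyRange_one]; omega)
      rw [PySem.List.pyGet?_natCast, PySem.List.pyGet?_natCast] at this
      rw [List.getElem?_take, if_pos hk, ← this]
    · rw [List.getElem?_take, if_neg hk, List.getElem?_eq_none (by omega)]
  · intro hpre i hi
    rw [PySem.List.mem_pyRange_one] at hi
    obtain ⟨h0, hlt⟩ := hi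
    have hk : i = ((i.toNat : Nat) : Int) := by omega
    rw [hk, PySem.List.pyGet?_natCast, PySem.List.pyGet?_natCast]
    rw [List.prefix_iff_eq_take] at hpre
    rw [hpre, List.getElem?_take, if_pos (by omega)]

-- 7. the split-lengths-and-prefix condition in terms of the raw strings
theorem splitChar_iff (cs ps : List Char) :
    ((cs.splitOn '/').length = (ps.splitOn '/').length + 1 ∧ ps.splitOn '/' <+: cs.splitOn '/')
      ↔ ((ps ++ ['/']) <+: cs ∧ '/' ∉ cs.drop (ps.length + 1)) := by
  constructor
  · rintro ⟨hlen, hpre⟩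
    obtain ⟨r, hr⟩ := hpre
    have hrlen : r.length = 1 := by
      have := congrArg List.length hr
      simp at this; omega
    obtain ⟨t, ht⟩ := List.length_eq_one_iff.mp hrlen
    subst ht
    have hcs : cs = ps ++ '/' :: t := by
      conv_lhs => rw [← List.intercalate_splitOn cs '/']
      rw [← hr, intercalate_append_singleton '/' (List.splitOn '/' ps) t
          (by rw [List.splitOn]; exact List.splitOnP_ne_nil _ _),
        List.intercalate_splitOn]
    have hnot : '/' ∉ t := by
      intro hmem
      have hmem' : t ∈ List.splitOnP (fun x => x == '/') cs := by
        have h2 : t ∈ List.splitOn '/' cs := by rw [← hr]; simp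
        simpa [List.splitOn] using h2
      exact mem_splitOnP_not _ cs t hmem' '/' hmem (by simp)
    constructor
    · exact ⟨t, by simpa using hcs.symm⟩
    · have : cs.drop (ps.length + 1) = t := by
        rw [hcs]
        have : ps.length + 1 = (ps ++ ['/']).length := by simp
        rw [this, show ps ++ '/' :: t = (ps ++ ['/']) ++ t by simp, List.drop_left]
      rw [this]; exact hnot
  · rintro ⟨⟨t, ht⟩, hdrop⟩
    have hcs : cs = ps ++ '/' :: t := by rw [← ht]; simp
    have htd : cs.drop (ps.length + 1) = t := by
      rw [hcs, show ps.length + 1 = (ps ++ ['/']).length by simp,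
        show ps ++ '/' :: t = (ps ++ ['/']) ++ t by simp, List.drop_left]
    rw [htd] at hdrop
    have hsplit : cs.splitOn '/' = ps.splitOn '/' ++ [t] := by
      have h1 : List.splitOnP (fun x => x == '/') t = [t] :=
        List.splitOnP_eq_single _ _ (by intro x hx; simp; rintro rfl; exact hdrop hx)
      rw [hcs, List.splitOn, List.splitOnP_append_cons _ _ _ _ (by simp), h1, List.splitOn]
    rw [hsplit]
    constructor
    · simp
    · exact ⟨[t], rfl⟩

theorem split?_slash (s : String) : PySem.Str.split? s "/" = some (((s.toList).splitOn '/').map String.ofList) := by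
  rw [PySem.Str.split?, PySem.Chars.split?]
  rw [show ("/" : String).toList = ['/'] from rfl]
  simp [pysplit_single]

theorem bcond_iff (s p : String) :
    (PySem.Str.startswith s (p ++ "/")
      && !(PySem.Str.isIn "/" (PySem.Str.slice s (some ((PySem.Str.len p) + 1)) none))) = true
    ↔ ((p.toList ++ ['/']) <+: s.toList ∧ '/' ∉ s.toList.drop (p.toList.length + 1)) := by
  rw [Bool.and_eq_true, PySem.Str.startswith, Bool.not_eq_true']
  have h1 : (p ++ "/").toList = p.toList ++ ['/'] := by
    rw [String.toList_append]; rfl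
  have h2 : (PySem.Str.slice s (some ((PySem.Str.len p) + 1)) none).toList
      = s.toList.drop (p.toList.length + 1) := by
    rw [PySem.Str.toList_slice, PySem.Chars.slice_eq_listSlice, PySem.Str.len]
    rw [PySem.List.slice_from _ (by positivity)]
    simp
  rw [h1, PySem.Chars.startswith_iff]
  rw [PySem.Str.isIn, show ("/" : String).toList = ['/'] from rfl, h2]
  rw [PySem.Chars.isIn_eq_false_iff, List.singleton_infix_iff]

theorem core_eq (son parent : String) : is_parent son parent = is_parent_alt son parent := by
  unfold is_parent is_parent_alt
  simp only [split?_slash, Option.getD_some, List.length_map]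
  set s := rstripSlash son with hs
  set p := rstripSlash parent with hp
  set L := s.toList.splitOn '/' with hL
  set P := p.toList.splitOn '/' with hP
  rw [loop_eq_if]
  have key := splitChar_iff s.toList p.toList
  rw [← hL, ← hP] at key
  by_cases hC : (p.toList ++ ['/']) <+: s.toList ∧ '/' ∉ s.toList.drop (p.toList.length + 1)
  · obtain ⟨hlen, hpre⟩ := key.mpr hC
    rw [if_neg (by omega), if_pos (by omega)]
    have hall := (forall_range_get_iff_prefix (L.map String.ofList) (P.map String.ofList)
      (by simp [hlen])).mpr (hpre.map _)
    simp only [List.length_map] at hall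
    rw [if_pos hall, if_pos ((bcond_iff s p).mpr hC)]
  · rw [if_neg (fun h => hC ((bcond_iff s p).mp h))]
    by_cases h1 : P.length ≥ L.length
    · rw [if_pos h1]
    · rw [if_neg h1]
      by_cases h2 : (L.length : Int) - (P.length : Int) = 1
      · rw [if_pos h2]
        have hlen : L.length = P.length + 1 := by omega
        rw [if_neg ?noall]
        case noall =>
          intro hall
          have hpre := (forall_range_get_iff_prefix (L.map String.ofList) (P.map String.ofList)
            (by simp [hlen])).mp (by simpa using hall)
          exact hC (key.mp ⟨hlen, (map_prefix_iff (fun _ _ h => String.ofList_inj.mp h) P L).mp hpre⟩)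
      · rw [if_neg h2]

-- ===== VERDICT (by name: the statement is the Claim_ definition above) =====
theorem is_parent_spec : Claim_equal_is_parent := by
  intro son parent _
  unfold Spec_is_parent
  exact core_eq son parent
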